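-- pv_equiv track=rewrite | github.com/icefoxtail/AP------ | fix_jsarchive_choice_extractor_v2.py | split_top_level_objects
-- ===== SOURCE A (Python) =====
-- from typing import List, Optional, Tuple
--
-- def split_top_level_objects(array_text: str) -> List[Tuple[int, int, str]]:
--     items: List[Tuple[int, int, str]] = []
--     in_str = False
--     esc = False
--     quote = ""
--     depth = 0
--     obj_start: Optional[int] = None
--
--     for i, ch in enumerate(array_text):
--         if in_str:
--             if esc:
--                 esc = False
--             elif ch == "\\":
--                 esc = True
--             elif ch == quote:
--                 in_str = False
--             continue
--
--         if ch in ("'", '"'):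
--             in_str = True
--             quote = ch
--             continue
--
--         if ch == "{":
--             if depth == 0:
--                 obj_start = i
--             depth += 1
--         elif ch == "}":
--             depth -= 1
--             if depth == 0 and obj_start is not None:
--                 items.append((obj_start, i + 1, array_text[obj_start:i + 1]))
--                 obj_start = None
--
--     return items
-- ===== SOURCE B (Python) =====
-- from typing import List, Optional, Tuple
--
-- def split_top_level_objects(array_text: str) -> List[Tuple[int, int, str]]:
--     # Pass 1: mark which positions are code (outside any string literal).
--     code: List[bool] = []
--     in_str = False
--     esc = False
--     quote = ""
--     for ch in array_text:
--         if in_str: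
--             if esc:
--                 esc = False
--             elif ch == "\\":
--                 esc = True
--             elif ch == quote:
--                 in_str = False
--             code.append(False)
--         elif ch in ("'", '"'):
--             in_str = True
--             quote = ch
--             code.append(False)
--         else:
--             code.append(True)
--
--     # Pass 2: brace-depth scan consulting the mask only.
--     items: List[Tuple[int, int, str]] = []
--     depth = 0
--     obj_start: Optional[int] = None
--     for i, (ch, is_code) in enumerate(zip(array_text, code)):
--         if not is_code:
--             continue
--         if ch == "{":
--             if depth == 0:
--                 obj_start = i
--             depth += 1
--         elif ch == "}":
--             depth -= 1
--             if depth == 0 and obj_start is not None: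
--                 items.append((obj_start, i + 1, array_text[obj_start:i + 1]))
--                 obj_start = None
--     return items
-- ===== Notes on version B (the rewrite author's own statement) =====
-- stated objective: alternative
-- what changed: Replaces A's single interleaved quote/brace scan by two passes: pass 1 runs only the string/escape state machine to build a boolean code-position mask, pass 2 runs only the brace-depth logic over the masked characters.
import Mathlib
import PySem

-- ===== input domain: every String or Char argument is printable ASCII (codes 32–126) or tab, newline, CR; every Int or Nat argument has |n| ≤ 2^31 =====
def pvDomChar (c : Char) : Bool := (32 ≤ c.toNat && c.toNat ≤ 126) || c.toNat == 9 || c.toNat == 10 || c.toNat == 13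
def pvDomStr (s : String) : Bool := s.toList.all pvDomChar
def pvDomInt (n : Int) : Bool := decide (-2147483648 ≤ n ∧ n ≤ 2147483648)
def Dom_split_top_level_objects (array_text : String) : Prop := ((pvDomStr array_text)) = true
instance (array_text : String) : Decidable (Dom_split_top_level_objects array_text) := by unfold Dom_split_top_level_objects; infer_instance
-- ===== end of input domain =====

-- B differs from A by decomposition only: same values, two passes instead of one interleaved scan.

-- ===== PORT A =====
-- A's single loop: string state (in_str, esc, quote) and brace state (depth, obj_start) interleaved.
def pvALoop (full : List Char) (s : List Char) (i : Int) (in_str esc : Bool) (quote : String)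
    (depth : Int) (obj_start : Option Int) (items : List (Int × Int × String)) :
    List (Int × Int × String) :=
  match s with
  | [] => items
  | ch :: rest =>
    if in_str then
      if esc then pvALoop full rest (i+1) in_str false quote depth obj_start items
      else if ch = '\\' then pvALoop full rest (i+1) in_str true quote depth obj_start items
      else if String.mk [ch] = quote then pvALoop full rest (i+1) false esc quote depth obj_start items
      else pvALoop full rest (i+1) in_str esc quote depth obj_start items
    else if ch = '\'' ∨ ch = '"' then
      pvALoop full rest (i+1) true esc (String.mk [ch]) depth obj_start items
    else if ch = '{' then
      pvALoop full rest (i+1) in_str esc quote (depth+1)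
        (if depth = 0 then some i else obj_start) items
    else if ch = '}' then
      if depth - 1 = 0 ∧ obj_start ≠ none then
        match obj_start with
        | some st =>
            pvALoop full rest (i+1) in_str esc quote (depth-1) none
              (items ++ [(st, i+1, String.mk (PySem.List.slice full (some st) (some (i+1))))])
        | none => pvALoop full rest (i+1) in_str esc quote (depth-1) obj_start items
      else pvALoop full rest (i+1) in_str esc quote (depth-1) obj_start items
    else pvALoop full rest (i+1) in_str esc quote depth obj_start items

def split_top_level_objects (array_text : String) : List (Int × Int × String) :=
  pvALoop array_text.toList array_text.toList 0 false false "" 0 none []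

-- ===== PORT B =====
-- B pass 1: only the string/escape state machine; emits the code-position mask.
def pvBMask (s : List Char) (in_str esc : Bool) (quote : String) : List Bool :=
  match s with
  | [] => []
  | ch :: rest =>
    if in_str then
      if esc then false :: pvBMask rest in_str false quote
      else if ch = '\\' then false :: pvBMask rest in_str true quote
      else if String.mk [ch] = quote then false :: pvBMask rest false esc quote
      else false :: pvBMask rest in_str esc quote
    else if ch = '\'' ∨ ch = '"' then false :: pvBMask rest true esc (String.mk [ch])
    else true :: pvBMask rest in_str esc quote

-- B pass 2: only the brace-depth logic, over (char, is_code) pairs.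
def pvBScan (full : List Char) (s : List (Char × Bool)) (i : Int) (depth : Int)
    (obj_start : Option Int) (items : List (Int × Int × String)) :
    List (Int × Int × String) :=
  match s with
  | [] => items
  | (ch, is_code) :: rest =>
    if ¬ is_code then pvBScan full rest (i+1) depth obj_start items
    else if ch = '{' then
      pvBScan full rest (i+1) (depth+1) (if depth = 0 then some i else obj_start) items
    else if ch = '}' then
      if depth - 1 = 0 ∧ obj_start ≠ none then
        match obj_start with
        | some st =>
            pvBScan full rest (i+1) (depth-1) none
              (items ++ [(st, i+1, String.mk (PySem.List.slice full (some st) (some (i+1))))])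
        | none => pvBScan full rest (i+1) (depth-1) obj_start items
      else pvBScan full rest (i+1) (depth-1) obj_start items
    else pvBScan full rest (i+1) depth obj_start items

def split_top_level_objects_alt (array_text : String) : List (Int × Int × String) :=
  let cs := array_text.toList
  pvBScan cs (cs.zip (pvBMask cs false false "")) 0 0 none []

-- ===== PRECONDITION & SPEC =====
def Spec_split_top_level_objects (array_text : String) (out : List (Int × Int × String)) : Prop := out = split_top_level_objects_alt array_text
instance (array_text : String) (out : List (Int × Int × String)) : Decidable (Spec_split_top_level_objects array_text out) := by unfold Spec_split_top_level_objects; infer_instance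

-- ===== CLAIM (what is proved, stated in full; the proofs are below) =====
def Claim_equal_split_top_level_objects : Prop := ∀ (array_text : String), Dom_split_top_level_objects array_text → Spec_split_top_level_objects array_text (split_top_level_objects array_text)

-- ===== LEMMAS AND PROOFS =====

-- A's interleaved scan equals B's masked scan for every shared state.
theorem pvALoop_eq_scan_mask (full : List Char) :
    ∀ (s : List Char) (i : Int) (in_str esc : Bool) (quote : String)
      (depth : Int) (obj_start : Option Int) (items : List (Int × Int × String)),
      pvALoop full s i in_str esc quote depth obj_start items =
      pvBScan full (s.zip (pvBMask s in_str esc quote)) i depth obj_start items := by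
  intro s
  induction s with
  | nil => intro i in_str esc quote depth obj_start items; simp [pvALoop, pvBMask, pvBScan]
  | cons ch rest ih =>
    intro i in_str esc quote depth obj_start items
    by_cases hstr : in_str
    · by_cases hesc : esc
      · simp [pvALoop, pvBMask, pvBScan, hstr, hesc, ih]
      · by_cases hbs : ch = '\\'
        · simp [pvALoop, pvBMask, pvBScan, hstr, hesc, hbs, ih]
        · by_cases hq : String.mk [ch] = quote
          · simp [pvALoop, pvBMask, pvBScan, hstr, hesc, hbs, hq, ih]
          · simp [pvALoop, pvBMask, pvBScan, hstr, hesc, hbs, hq, ih]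
    · by_cases hquo : ch = '\'' ∨ ch = '"'
      · simp [pvALoop, pvBMask, pvBScan, hstr, hquo, ih]
      · by_cases hob : ch = '{'
        · simp [pvALoop, pvBMask, pvBScan, hstr, hquo, hob, ih]
        · by_cases hcb : ch = '}'
          · by_cases hcl : depth - 1 = 0 ∧ obj_start ≠ none
            · obtain ⟨st, hst⟩ : ∃ st, obj_start = some st := by
                cases obj_start with
                | none => exact absurd rfl hcl.2
                | some st => exact ⟨st, rfl⟩
              subst hst
              simp [pvALoop, pvBMask, pvBScan, hstr, hob, hcb, hcl, ih]
            · simp [pvALoop, pvBMask, pvBScan, hstr, hob, hcb, hcl, ih]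
          · simp [pvALoop, pvBMask, pvBScan, hstr, hquo, hob, ih]

-- ===== VERDICT (by name: the statement is the Claim_ definition above) =====
theorem split_top_level_objects_spec : Claim_equal_split_top_level_objects := by
  intro array_text _
  unfold Spec_split_top_level_objects split_top_level_objects split_top_level_objects_alt
  exact pvALoop_eq_scan_mask _ _ 0 false false "" 0 none []
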